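-- pv_equiv track=rewrite | github.com/pc5401/my_BOJ | 백준/Gold/17140. 이차원 배열과 연산/이차원 배열과 연산.py | C_func
-- ===== SOURCE A (Python) =====
-- import collections
--
-- def C_func(n: int,m: int, A: list) -> int:
--     row = n
--
--     arr = []
--     for j in range(m):
--         col_lst = [A[i][j] for i in range(n)] # 세로
--         lst = []
--         cnt = collections.Counter(col_lst)
--         for key in cnt.keys():
--             if key > 0:
--                 lst.append([key, cnt[key]])
--
--         lst.sort(key=lambda x: (x[1], x[0]))
--         arr.append(sum(lst, [])) # flatten
--         row = max(row, len(arr[j]))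
--
--     new_A = [[0]*m for _ in range(row)]
--
--     for j in range(m):
--         for i in range(len(arr[j])):
--             new_A[i][j] = arr[j][i]
--
--     return new_A, row
-- ===== SOURCE B (Python) =====
-- def _runs(xs):
--     # xs is sorted; return [[value, multiplicity]] by grouping consecutive equals
--     if not xs:
--         return []
--     v = xs[0]
--     k = 1
--     while k < len(xs) and xs[k] == v:
--         k += 1
--     return [[v, k]] + _runs(xs[k:])
--
-- def C_func(n: int, m: int, A: list) -> int:
--     cols = [[A[i][j] for i in range(n)] for j in range(m)]
--     flats = []
--     for col in cols:
--         pairs = _runs(sorted(v for v in col if v > 0))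
--         pairs.sort(key=lambda p: (p[1], p[0]))
--         flats.append([x for p in pairs for x in p])
--     row = max([n] + [len(f) for f in flats])
--     new_A = [[f[i] if i < len(f) else 0 for f in flats] for i in range(row)]
--     return new_A, row
-- ===== Notes on version B (the rewrite author's own statement) =====
-- stated objective: alternative
-- what changed: Counts per column are obtained by sorting the positive entries and grouping consecutive runs instead of building a collections.Counter, and the output grid is assembled directly by a per-row comprehension over the flattened columns instead of mutating a preallocated zero matrix with nested index loops.
import Mathlib
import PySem

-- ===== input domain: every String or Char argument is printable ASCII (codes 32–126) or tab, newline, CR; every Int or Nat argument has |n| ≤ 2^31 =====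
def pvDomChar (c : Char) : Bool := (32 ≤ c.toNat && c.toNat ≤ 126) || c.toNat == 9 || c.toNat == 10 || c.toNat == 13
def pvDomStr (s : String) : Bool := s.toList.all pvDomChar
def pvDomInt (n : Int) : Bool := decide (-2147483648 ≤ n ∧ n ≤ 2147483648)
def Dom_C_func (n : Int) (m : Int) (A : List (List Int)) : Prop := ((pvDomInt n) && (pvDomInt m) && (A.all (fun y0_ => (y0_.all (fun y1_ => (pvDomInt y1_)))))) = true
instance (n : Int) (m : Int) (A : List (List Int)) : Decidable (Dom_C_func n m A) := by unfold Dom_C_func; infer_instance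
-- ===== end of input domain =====

-- B replaces A's per-column Counter by sort-and-group-runs counting and assembles the
-- output grid directly by a per-row comprehension instead of index-mutating a
-- preallocated zero matrix (objective: alternative decomposition, same result).

-- ===== PORT A =====
-- Python's two-element list [key, cnt[key]] is ported as the pair (key, cnt[key]);
-- `.toNat` on the assignment indices is exact because i, j come from range(...) so are ≥ 0.
def C_func (n : Int) (m : Int) (A : List (List Int)) : List (List Int) × Int :=
  let st := (PySem.List.pyRange 0 m 1).foldl (fun (st : List (List Int) × Int) j =>
    let col := (PySem.List.pyRange 0 n 1).map (fun i =>
      PySem.List.pyGetD (PySem.List.pyGetD A i []) j 0)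
    let cnt := PySem.Dict.counter col
    let lst := cnt.keys.foldl (fun l k =>
      if 0 < k then l ++ [(k, cnt.getD k 0)] else l) ([] : List (Int × Int))
    let lst := PySem.List.sorted2 lst (fun x => x.2) (fun x => x.1)
    let flat := lst.foldl (fun acc x => acc ++ [x.1, x.2]) ([] : List Int)
    (st.1 ++ [flat], max st.2 (flat.length : Int))) ([], n)
  let arr := st.1
  let row := st.2
  let newA0 := (PySem.List.pyRange 0 row 1).map (fun _ => PySem.List.pyRepeat [(0 : Int)] m)
  let newA := (PySem.List.pyRange 0 m 1).foldl (fun M j =>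
    (PySem.List.pyRange 0 ((PySem.List.pyGetD arr j []).length : Int) 1).foldl (fun M i =>
      M.set i.toNat ((PySem.List.pyGetD M i []).set j.toNat
        (PySem.List.pyGetD (PySem.List.pyGetD arr j []) i 0))) M) newA0
  (newA, row)

-- ===== PORT B =====
-- _runs from Source B: group a sorted list into (value, multiplicity) pairs
def pvRuns : List Int → List (Int × Int)
  | [] => []
  | v :: t =>
    (v, 1 + (t.takeWhile (fun x => x == v)).length) :: pvRuns (t.dropWhile (fun x => x == v))
termination_by xs => xs.length
decreasing_by
  simpa [Nat.lt_succ_iff] using List.length_dropWhile_le (fun x => x == v) t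

def C_func_alt (n : Int) (m : Int) (A : List (List Int)) : List (List Int) × Int :=
  let cols := (PySem.List.pyRange 0 m 1).map (fun j =>
    (PySem.List.pyRange 0 n 1).map (fun i =>
      PySem.List.pyGetD (PySem.List.pyGetD A i []) j 0))
  let flats := cols.map (fun col =>
    let pairs := pvRuns (PySem.List.sorted (col.filter (fun v => decide (0 < v))) (fun v => v))
    let pairs := PySem.List.sorted2 pairs (fun p => p.2) (fun p => p.1)
    pairs.flatMap (fun p => [p.1, p.2]))
  let row := flats.foldl (fun r f => max r (f.length : Int)) n
  let newA := (PySem.List.pyRange 0 row 1).map (fun i =>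
    flats.map (fun f => PySem.List.pyGetD f i 0))
  (newA, row)

-- ===== PRECONDITION & SPEC =====
-- Pre_ excludes exactly the inputs where A raises IndexError: when m > 0, A reads
-- A[i][j] for every 0 ≤ i < n, 0 ≤ j < m, so A must have at least n rows (for n ≤ 0
-- nothing is read) and each of the first n rows must have at least m entries.
def Pre_C_func (n : Int) (m : Int) (A : List (List Int)) : Prop :=
  0 < m → (n ≤ (A.length : Int) ∧ ∀ r ∈ A.take n.toNat, m ≤ (r.length : Int))
instance (n : Int) (m : Int) (A : List (List Int)) : Decidable (Pre_C_func n m A) := by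
  unfold Pre_C_func; infer_instance

def pvWitness_C_func : Int × Int × List (List Int) := (3, 2, [[1, 2], [1, 1], [2, 1]])

def Spec_C_func (n : Int) (m : Int) (A : List (List Int)) (out : List (List Int) × Int) : Prop := out = C_func_alt n m A
instance (n : Int) (m : Int) (A : List (List Int)) (out : List (List Int) × Int) : Decidable (Spec_C_func n m A out) := by unfold Spec_C_func; infer_instance

-- ===== CLAIM (what is proved, stated in full; the proofs are below) =====
def Claim_equal_C_func : Prop := ∀ (n : Int) (m : Int) (A : List (List Int)), Dom_C_func n m A → Pre_C_func n m A → Spec_C_func n m A (C_func n m A)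

-- ===== LEMMAS AND PROOFS =====

-- the column j of the first n rows, as both ports extract it
def pvColOf (n : Int) (A : List (List Int)) (j : Int) : List Int :=
  (PySem.List.pyRange 0 n 1).map (fun i => PySem.List.pyGetD (PySem.List.pyGetD A i []) j 0)

-- B's flattened, (count, value)-sorted pair list of a column
def pvFlat (n : Int) (A : List (List Int)) (j : Int) : List Int :=
  (PySem.List.sorted2
    (pvRuns (PySem.List.sorted ((pvColOf n A j).filter (fun v => decide (0 < v))) (fun v => v)))
    (fun p => p.2) (fun p => p.1)).flatMap (fun p => [p.1, p.2])

-- A's flattened, (count, value)-sorted pair list of a column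
def pvFlatA (n : Int) (A : List (List Int)) (j : Int) : List Int :=
  (PySem.List.sorted2
    ((PySem.Dict.counter (pvColOf n A j)).keys.foldl (fun l k =>
      if 0 < k then l ++ [(k, (PySem.Dict.counter (pvColOf n A j)).getD k 0)] else l)
      ([] : List (Int × Int)))
    (fun x => x.2) (fun x => x.1)).foldl (fun acc x => acc ++ [x.1, x.2]) ([] : List Int)

-- A's first loop, with its let-bindings zeta-reduced
def pvArrRowA (n : Int) (m : Int) (A : List (List Int)) : List (List Int) × Int :=
  (PySem.List.pyRange 0 m 1).foldl (fun (st : List (List Int) × Int) j =>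
    (st.1 ++ [pvFlatA n A j], max st.2 ((pvFlatA n A j).length : Int))) ([], n)

theorem pvSorted2_eq_sorted_lex (xs : List (Int × Int)) :
    PySem.List.sorted2 xs (fun p => p.2) (fun p => p.1)
      = PySem.List.sorted xs (fun p => toLex (p.2, p.1)) := by
  unfold PySem.List.sorted2 PySem.List.sorted
  simp only [if_neg (by decide : ¬ (false = true))]
  congr 1
  funext acc x
  congr 1
  funext a b
  simp only [Prod.Lex.toLex_lt_toLex]
  by_cases h1 : a.2 < b.2 <;> by_cases h2 : b.2 < a.2 <;> by_cases h3 : a.1 < b.1 <;>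
    simp [h1, h2, h3] <;> omega

theorem pvOfList_filter (p : Int → Bool) (l : List Int) :
    PySem.Set.ofList (l.filter p) = (PySem.Set.ofList l).filter p := by
  induction l with
  | nil => rfl
  | cons x xs ih =>
    by_cases hx : p x
    · simp only [List.filter_cons, hx, if_pos, PySem.Set.ofList_cons, ih,
        PySem.Set.discard, List.filter_filter]
      congr 1
      apply List.filter_congr
      intro y _
      rw [Bool.and_comm]
    · simp only [List.filter_cons, hx, if_neg, Bool.false_eq_true, not_false_iff,
        PySem.Set.ofList_cons, ih, PySem.Set.discard, List.filter_filter]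
      apply List.filter_congr
      intro y hy
      cases hyx : y == x
      · simp
      · have : y = x := by simpa using hyx
        subst this
        simp [hx]

theorem pvRuns_sorted (s : List Int) (hs : s.Pairwise (· ≤ ·)) :
    pvRuns s = (PySem.Set.ofList s).map (fun v => (v, (s.count v : Int))) := by
  induction s using pvRuns.induct with
  | case1 => rw [pvRuns]; rfl
  | case2 v t ih =>
    set same := t.takeWhile (fun x => x == v) with hsame
    set rest := t.dropWhile (fun x => x == v) with hrest
    have ht : same ++ rest = t := List.takeWhile_append_dropWhile
    have hsv : ∀ x ∈ same, x = v := by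
      intro x hx
      simpa using List.mem_takeWhile_imp hx
    have htp : t.Pairwise (· ≤ ·) := (List.pairwise_cons.mp hs).2
    have hvt : ∀ x ∈ t, v ≤ x := (List.pairwise_cons.mp hs).1
    have hrp : rest.Pairwise (· ≤ ·) := List.Pairwise.sublist (List.dropWhile_sublist _) htp
    have hvrest : v ∉ rest := by
      intro hv
      cases hr : rest with
      | nil => rw [hr] at hv; simp at hv
      | cons h r =>
        have hhne : ¬ (h == v) = true := by
          have hne : List.dropWhile (fun x => x == v) t ≠ [] := by rw [← hrest, hr]; simp
          have h1 := List.head_dropWhile_not (fun x => x == v) hne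
          have h2 : (List.dropWhile (fun x => x == v) t).head? = some h := by
            rw [← hrest, hr]; rfl
          rw [List.head?_eq_some_head hne] at h2
          simp only [Option.some_inj] at h2
          rw [h2] at h1
          simp [h1]
        have hhv : v < h := by
          have : v ≤ h := hvt h (by rw [← ht, hr]; simp)
          rcases lt_or_eq_of_le this with h' | h'
          · exact h'
          · exact absurd (by simp [h'.symm]) hhne
        rw [hr] at hv
        rcases List.mem_cons.mp hv with h' | h'
        · omega
        · have : h ≤ v := (List.pairwise_cons.mp (hr ▸ hrp)).1 v h'
          omega
    have hsrep : same = List.replicate same.length v := List.eq_replicate_of_mem hsv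
    have hcv : (v :: t).count v = 1 + same.length := by
      rw [← ht, List.count_cons_self, List.count_append]
      rw [List.count_eq_zero.mpr hvrest]
      conv_lhs => rw [hsrep]
      simp
      omega
    have hck : ∀ k ∈ rest, (v :: t).count k = rest.count k := by
      intro k hk
      have hkv : k ≠ v := fun h => hvrest (h ▸ hk)
      rw [← ht, List.count_cons_of_ne (Ne.symm hkv), List.count_append]
      conv_lhs => rw [hsrep]
      simp [List.count_replicate, Ne.symm hkv]
    have hofl : PySem.Set.ofList (v :: t) = v :: PySem.Set.ofList rest := by
      rw [PySem.Set.ofList_cons]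
      congr 1
      show (PySem.Set.ofList t).discard v = _
      have : (PySem.Set.ofList t).discard v = (PySem.Set.ofList t).filter (fun y => !(y == v)) := rfl
      rw [this, ← pvOfList_filter]
      congr 1
      rw [← ht, List.filter_append]
      rw [List.filter_eq_nil_iff.mpr (by intro a ha; simp [hsv a ha])]
      rw [List.filter_eq_self.mpr (by intro a ha; simp; intro h; exact hvrest (h ▸ ha))]
      simp
    rw [pvRuns, hofl, List.map_cons]
    congr 1
    · rw [← hsame]
      simp only [hcv, Prod.mk.injEq, true_and]
      push_cast
      ring
    · rw [ih hrp]
      apply List.map_congr_left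
      intro k hk
      have : k ∈ rest := (PySem.Set.mem_ofList _ _).mp hk
      rw [hck k this]

theorem pvColPairs_eq (col : List Int) :
    PySem.List.sorted2 ((PySem.Dict.counter col).keys.foldl (fun l k =>
        if 0 < k then l ++ [(k, (PySem.Dict.counter col).getD k 0)] else l) ([] : List (Int × Int)))
        (fun x => x.2) (fun x => x.1)
      = PySem.List.sorted2 (pvRuns (PySem.List.sorted (col.filter (fun v => decide (0 < v))) (fun v => v)))
        (fun p => p.2) (fun p => p.1) := by
  have hA : (PySem.Dict.counter col).keys.foldl (fun l k =>
        if 0 < k then l ++ [(k, (PySem.Dict.counter col).getD k 0)] else l) ([] : List (Int × Int))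
      = (PySem.Set.ofList (col.filter (fun v => decide (0 < v)))).map
          (fun k => (k, (col.count k : Int))) := by
    rw [PySem.List.foldl_append_ite (fun k => 0 < k)
      (fun k => (k, (PySem.Dict.counter col).getD k 0))]
    rw [PySem.Dict.keys_counter, pvOfList_filter]
    simp [PySem.Dict.getD_counter]
  set s := PySem.List.sorted (col.filter (fun v => decide (0 < v))) (fun v => v) with hsdef
  have hB : pvRuns s = (PySem.Set.ofList s).map (fun k => (k, (col.count k : Int))) := by
    rw [pvRuns_sorted s (by simpa using PySem.List.sorted_pairwise (col.filter (fun v => decide (0 < v))) (fun v => v))]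
    apply List.map_congr_left
    intro k hk
    have hks : k ∈ s := (PySem.Set.mem_ofList _ _).mp hk
    have hkf : k ∈ col.filter (fun v => decide (0 < v)) := by
      rw [hsdef] at hks; exact (PySem.List.mem_sorted _ _ _ _).mp hks
    have hpos : (0 : Int) < k := by simpa using (List.mem_filter.mp hkf).2
    have hperm : s.Perm (col.filter (fun v => decide (0 < v))) := PySem.List.sorted_perm _ _ _
    rw [hperm.count_eq, List.count_filter (by simpa using hpos)]
  have hperm2 : (PySem.Set.ofList (col.filter (fun v => decide (0 < v)))).Perm
      (PySem.Set.ofList s) := by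
    rw [List.perm_ext_iff_of_nodup (PySem.Set.nodup_ofList _) (PySem.Set.nodup_ofList _)]
    intro a
    simp only [PySem.Set.mem_ofList]
    rw [hsdef, PySem.List.mem_sorted]
  have hinj : Function.Injective (fun p : Int × Int => toLex (p.2, p.1)) := by
    intro a b h
    have h2 : ((a.2, a.1) : Int × Int) = (b.2, b.1) := toLex.injective h
    simp only [Prod.mk.injEq] at h2
    exact Prod.ext h2.2 h2.1
  rw [hA, hB, pvSorted2_eq_sorted_lex, pvSorted2_eq_sorted_lex]
  exact PySem.List.sorted_eq_sorted_of_perm _ _ _ hinj (hperm2.map _)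

theorem pvFlatA_eq (n : Int) (A : List (List Int)) (j : Int) :
    pvFlatA n A j = pvFlat n A j := by
  unfold pvFlatA pvFlat
  rw [PySem.List.foldl_append_eq_flatMap (g := fun x : Int × Int => [x.1, x.2]), List.nil_append,
    pvColPairs_eq]

theorem pvPyGetD_map_pyRange (f : Int → List Int) (L : Nat) (k : Nat) (hk : k < L) :
    PySem.List.pyGetD ((PySem.List.pyRange 0 (L : Int) 1).map f) ((k : Nat) : Int) []
      = f (k : Int) := by
  rw [PySem.List.pyGetD_natCast, List.getD_eq_getElem?_getD, List.getElem?_map,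
    PySem.List.getElem?_pyRange_one]
  simp [hk]

theorem pvPyGetD_oob (f : List Int) (i : Int) (hi : (f.length : Int) ≤ i) :
    PySem.List.pyGetD f i 0 = 0 := by
  simp only [PySem.List.pyGetD, PySem.List.pyGet?, PySem.List.pyIdx?]
  split_ifs with h1 h2 <;> simp_all <;> omega

theorem pvGetDL_nat (fs : List (List Int)) (k : Nat) (hk : k < fs.length) :
    PySem.List.pyGetD fs ((k : Nat) : Int) [] = fs[k] := by
  rw [PySem.List.pyGetD_natCast, List.getD_eq_getElem?_getD, List.getElem?_eq_getElem hk,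
    Option.getD_some]

theorem pvSetColFold (g : Int → List Int → List Int) (K : Nat) :
    ∀ (M : List (List Int)), K ≤ M.length →
    (PySem.List.pyRange 0 (K : Int) 1).foldl
        (fun M' i => M'.set i.toNat (g i (PySem.List.pyGetD M' i []))) M
      = (PySem.List.pyRange 0 (M.length : Int) 1).map (fun i =>
          if i < (K : Int) then g i (PySem.List.pyGetD M i []) else PySem.List.pyGetD M i []) := by
  induction K with
  | zero =>
    intro M hK
    rw [PySem.List.pyRange_one_eq_nil (by norm_num)]
    simp only [List.foldl_nil]
    have h1 : ∀ i ∈ PySem.List.pyRange 0 (M.length : Int) 1,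
        (if i < ((0 : Nat) : Int) then g i (PySem.List.pyGetD M i []) else PySem.List.pyGetD M i [])
          = PySem.List.pyGetD M i [] := by
      intro i hi
      have := (PySem.List.mem_pyRange_one).mp hi
      rw [if_neg (by omega)]
    rw [List.map_congr_left h1]
    exact (PySem.List.map_pyGetD_pyRange_zero' M []).symm
  | succ K ih =>
    intro M hK
    have hK' : K ≤ M.length := Nat.le_of_succ_le hK
    have hKM : K < M.length := hK
    have hcast : ((K + 1 : Nat) : Int) = (K : Int) + 1 := by push_cast; ring
    rw [hcast, PySem.List.pyRange_one_succ_right (by positivity), List.foldl_append,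
      ih M hK']
    simp only [List.foldl_cons, List.foldl_nil]
    rw [pvPyGetD_map_pyRange _ _ K hKM, if_neg (by omega), Int.toNat_natCast]
    have hlenR : (PySem.List.pyRange 0 (M.length : Int) 1).length = M.length := by
      rw [PySem.List.length_pyRange_one]; omega
    apply List.ext_getElem
    · simp [hlenR]
    · intro i hi1 hi2
      rw [List.length_set, List.length_map, hlenR] at hi1
      rw [List.getElem_set, List.getElem_map, List.getElem_map,
        PySem.List.getElem_pyRange_one]
      simp only [zero_add]
      by_cases hKi : K = i
      · subst hKi; rw [if_pos rfl, if_pos (by omega)]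
      · rw [if_neg hKi]
        by_cases hlt : (i : Int) < (K : Int)
        · rw [if_pos hlt, if_pos (by omega)]
        · rw [if_neg hlt, if_neg (by omega)]

theorem pvOuterFold (flats : List (List Int)) (R : Nat)
    (hrow : ∀ f ∈ flats, f.length ≤ R) :
    ∀ (J : Nat), J ≤ flats.length →
    (PySem.List.pyRange 0 (J : Int) 1).foldl (fun M j =>
        (PySem.List.pyRange 0 ((PySem.List.pyGetD flats j []).length : Int) 1).foldl (fun M i =>
          M.set i.toNat ((PySem.List.pyGetD M i []).set j.toNat
            (PySem.List.pyGetD (PySem.List.pyGetD flats j []) i 0))) M)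
      ((PySem.List.pyRange 0 (R : Int) 1).map (fun _ => List.replicate flats.length (0 : Int)))
    = (PySem.List.pyRange 0 (R : Int) 1).map (fun i => (List.range flats.length).map (fun jj =>
        if jj < J then PySem.List.pyGetD (PySem.List.pyGetD flats ((jj : Nat) : Int) []) i 0 else 0)) := by
  intro J
  induction J with
  | zero =>
    intro _
    simp only [Nat.cast_zero]
    rw [PySem.List.pyRange_one_eq_nil (le_refl 0)]
    simp only [List.foldl_nil]
    apply List.map_congr_left
    intro i _
    simp
  | succ J ih =>
    intro hJ
    have hJ' : J ≤ flats.length := Nat.le_of_succ_le hJ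
    have hJlt : J < flats.length := hJ
    have hlenR : (PySem.List.pyRange 0 (R : Int) 1).length = R := by
      rw [PySem.List.length_pyRange_one]; omega
    have hcast : ((J + 1 : Nat) : Int) = (J : Int) + 1 := by push_cast; ring
    rw [hcast, PySem.List.pyRange_one_succ_right (by positivity), List.foldl_append, ih hJ']
    simp only [List.foldl_cons, List.foldl_nil]
    set gridJ := (PySem.List.pyRange 0 (R : Int) 1).map (fun i => (List.range flats.length).map (fun jj =>
        if jj < J then PySem.List.pyGetD (PySem.List.pyGetD flats ((jj : Nat) : Int) []) i 0 else 0)) with hgrid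
    have hglen : gridJ.length = R := by rw [hgrid, List.length_map, hlenR]
    have hfJ : PySem.List.pyGetD flats ((J : Nat) : Int) [] = flats[J] := pvGetDL_nat flats J hJlt
    have hKR : flats[J].length ≤ gridJ.length := by
      rw [hglen]; exact hrow _ (List.getElem_mem hJlt)
    rw [hfJ]
    rw [pvSetColFold (fun i r => r.set (((J : Nat) : Int)).toNat (PySem.List.pyGetD flats[J] i 0))
      flats[J].length gridJ hKR]
    rw [hglen]
    apply List.ext_getElem
    · simp [hlenR]
    · intro ii h1 h2
      rw [List.length_map, hlenR] at h1
      rw [List.getElem_map, List.getElem_map, PySem.List.getElem_pyRange_one]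
      simp only [zero_add]
      have hrowJ : PySem.List.pyGetD gridJ ((ii : Nat) : Int) []
          = (List.range flats.length).map (fun jj =>
              if jj < J then PySem.List.pyGetD (PySem.List.pyGetD flats ((jj : Nat) : Int) []) ((ii : Nat) : Int) 0 else 0) := by
        rw [hgrid]; exact pvPyGetD_map_pyRange _ R ii h1
      rw [hrowJ, Int.toNat_natCast]
      by_cases hcase : (ii : Int) < (flats[J].length : Int)
      · rw [if_pos hcase]
        apply List.ext_getElem
        · simp
        · intro jj hj1 hj2
          rw [List.length_set, List.length_map, List.length_range] at hj1
          rw [List.getElem_set, List.getElem_map, List.getElem_map]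
          simp only [List.getElem_range]
          by_cases hjJ : J = jj
          · subst hjJ
            rw [if_pos rfl, if_pos (by omega), hfJ]
          · rw [if_neg hjJ]
            by_cases hlt : jj < J
            · rw [if_pos hlt, if_pos (by omega)]
            · rw [if_neg hlt, if_neg (by omega)]
      · rw [if_neg hcase]
        apply List.ext_getElem
        · simp
        · intro jj hj1 hj2
          rw [List.length_map, List.length_range] at hj1
          rw [List.getElem_map, List.getElem_map]
          simp only [List.getElem_range]
          by_cases hjJ : jj = J
          · subst hjJ
            rw [if_neg (by omega), if_pos (by omega), hfJ,
              pvPyGetD_oob _ _ (by omega)]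
          · by_cases hlt : jj < J
            · rw [if_pos hlt, if_pos (by omega)]
            · rw [if_neg hlt, if_neg (by omega)]

theorem pvRangeMap_eq_map (F : List (List Int)) (i : Int) :
    (List.range F.length).map (fun jj =>
        if jj < F.length then PySem.List.pyGetD (PySem.List.pyGetD F ((jj : Nat) : Int) []) i 0 else 0)
      = F.map (fun f => PySem.List.pyGetD f i 0) := by
  apply List.ext_getElem
  · simp
  · intro k h1 h2
    rw [List.length_map, List.length_range] at h1
    rw [List.getElem_map, List.getElem_map]
    simp only [List.getElem_range]
    rw [if_pos h1, pvGetDL_nat F k h1]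

-- ===== VERDICT (by name: the statement is the Claim_ definition above) =====
theorem C_func_spec : Claim_equal_C_func := by
  intro n m A _ _
  unfold Spec_C_func
  -- restate both ports with their let-bindings zeta-reduced (definitional)
  have hC : C_func n m A =
      ((PySem.List.pyRange 0 m 1).foldl (fun M j =>
        (PySem.List.pyRange 0 ((PySem.List.pyGetD (pvArrRowA n m A).1 j []).length : Int) 1).foldl (fun M i =>
          M.set i.toNat ((PySem.List.pyGetD M i []).set j.toNat
            (PySem.List.pyGetD (PySem.List.pyGetD (pvArrRowA n m A).1 j []) i 0))) M)
        ((PySem.List.pyRange 0 (pvArrRowA n m A).2 1).map (fun _ => PySem.List.pyRepeat [(0 : Int)] m)),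
       (pvArrRowA n m A).2) := rfl
  have hB : C_func_alt n m A =
      ((PySem.List.pyRange 0 (((PySem.List.pyRange 0 m 1).map (pvFlat n A)).foldl
          (fun r f => max r (f.length : Int)) n) 1).map (fun i =>
        ((PySem.List.pyRange 0 m 1).map (pvFlat n A)).map (fun f => PySem.List.pyGetD f i 0)),
       ((PySem.List.pyRange 0 m 1).map (pvFlat n A)).foldl (fun r f => max r (f.length : Int)) n) := by
    unfold C_func_alt
    simp only [List.map_map]
    rfl
  have hAR : pvArrRowA n m A =
      ((PySem.List.pyRange 0 m 1).map (pvFlat n A),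
       (PySem.List.pyRange 0 m 1).foldl (fun r j => max r ((pvFlat n A j).length : Int)) n) := by
    unfold pvArrRowA
    rw [PySem.List.foldl_prod_mk (f := fun s j => s ++ [pvFlatA n A j])
      (g := fun r j => max r ((pvFlatA n A j).length : Int))]
    refine Prod.ext ?_ ?_
    · rw [PySem.List.foldl_append_singleton_eq_map, List.nil_append]
      exact List.map_congr_left (fun j _ => pvFlatA_eq n A j)
    · apply PySem.List.foldl_congr_mem
      intro acc j _
      rw [pvFlatA_eq n A j]
  have hrowB : ((PySem.List.pyRange 0 m 1).map (pvFlat n A)).foldl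
      (fun r f => max r (f.length : Int)) n
      = (PySem.List.pyRange 0 m 1).foldl (fun r j => max r ((pvFlat n A j).length : Int)) n := by
    rw [List.foldl_map]
  set F := (PySem.List.pyRange 0 m 1).map (pvFlat n A) with hF
  set row := (PySem.List.pyRange 0 m 1).foldl (fun r j => max r ((pvFlat n A j).length : Int)) n with hrowdef
  rw [hC, hB, hAR, hrowB]
  dsimp only
  refine Prod.ext ?_ rfl
  by_cases hm : m ≤ 0
  · rw [PySem.List.pyRange_one_eq_nil hm]
    simp only [List.foldl_nil]
    have hFnil : F = [] := by rw [hF, PySem.List.pyRange_one_eq_nil hm, List.map_nil]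
    rw [hFnil]
    apply List.map_congr_left
    intro i _
    simp [PySem.List.pyRepeat_singleton, Int.toNat_of_nonpos hm]
  · rw [not_le] at hm
    have hmN : m = ((m.toNat : Nat) : Int) := by omega
    have hFlen : F.length = m.toNat := by
      rw [hF, List.length_map, PySem.List.length_pyRange_one]; omega
    have hbound := PySem.List.le_foldl_max_int F (fun f => ((f.length : Nat) : Int)) n
    have hrowF : row = F.foldl (fun r f => max r ((f.length : Nat) : Int)) n := by
      rw [hrowdef, hF, List.foldl_map]
    have hrow0 : 0 ≤ row := by
      have h0F : 0 < F.length := by omega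
      have := hbound.2 (F[0]) (List.getElem_mem h0F)
      rw [← hrowF] at this
      have h2 : (0 : Int) ≤ ((F[0].length : Nat) : Int) := by positivity
      omega
    have hR : row = ((row.toNat : Nat) : Int) := by omega
    have hrowb : ∀ f ∈ F, f.length ≤ row.toNat := by
      intro f hf
      have := hbound.2 f hf
      rw [← hrowF] at this
      omega
    have hrep : (PySem.List.pyRange 0 row 1).map (fun _ => PySem.List.pyRepeat [(0 : Int)] m)
        = (PySem.List.pyRange 0 ((row.toNat : Nat) : Int) 1).map
            (fun _ => List.replicate F.length (0 : Int)) := by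
      rw [← hR]
      exact List.map_congr_left (fun _ _ => by
        rw [PySem.List.pyRepeat_singleton, hFlen])
    have hrange : PySem.List.pyRange 0 m 1 = PySem.List.pyRange 0 ((F.length : Nat) : Int) 1 := by
      rw [hFlen, ← hmN]
    rw [hrep, hrange, pvOuterFold F row.toNat hrowb F.length le_rfl, ← hR]
    exact List.map_congr_left (fun i _ => pvRangeMap_eq_map F i)
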